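-- pv_equiv track=rewrite | github.com/ganya002/RikoCompanion | riko_brain.py | _message_mentions_screen
-- ===== SOURCE A (Python) =====
-- def _message_mentions_screen(message):
--     lowered = message.lower()
--     return any(
--         phrase in lowered
--         for phrase in [
--             "screen",
--             "screenshot",
--             "look at this",
--             "what's on",
--             "what is on",
--             "see this",
--         ]
--     )
-- ===== SOURCE B (Python) =====
-- def _message_mentions_screen(message):
--     lowered = message.lower()
--     # one left-to-right positional scan; "screenshot" is subsumed by "screen"
--     phrases = ("screen", "look at this", "what's on", "what is on", "see this")
--     for i in range(len(lowered)):
--         for p in phrases: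
--             if lowered.startswith(p, i):
--                 return True
--     return False
-- ===== Notes on version B (the rewrite author's own statement) =====
-- stated objective: alternative
-- what changed: Replaces six independent substring membership scans with a single left-to-right positional scan that tests phrase prefixes at each index, and drops the redundant phrase 'screenshot' (subsumed by 'screen').
import Mathlib
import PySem

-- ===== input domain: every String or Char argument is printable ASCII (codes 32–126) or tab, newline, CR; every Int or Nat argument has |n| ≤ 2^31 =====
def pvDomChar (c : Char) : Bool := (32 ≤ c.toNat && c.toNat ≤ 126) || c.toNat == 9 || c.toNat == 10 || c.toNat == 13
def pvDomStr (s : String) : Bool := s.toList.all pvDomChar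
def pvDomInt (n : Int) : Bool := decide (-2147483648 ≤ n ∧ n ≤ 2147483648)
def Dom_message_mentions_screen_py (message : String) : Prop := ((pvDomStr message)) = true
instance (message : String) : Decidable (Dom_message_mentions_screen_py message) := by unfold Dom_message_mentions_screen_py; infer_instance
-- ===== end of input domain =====

-- B replaces six independent substring scans by one positional scan over the lowered
-- text (dropping the redundant phrase "screenshot"); same return value, no speed claim.

-- ===== PORT A =====
def message_mentions_screen_py (message : String) : Bool :=
  let lowered := PySem.Str.lower message
  -- any(phrase in lowered for phrase in [...])
  ["screen", "screenshot", "look at this", "what's on", "what is on", "see this"].any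
    (fun phrase => PySem.Str.isIn phrase lowered)

-- ===== PORT B =====
def altPhrases : List (List Char) :=
  ["screen".toList, "look at this".toList, "what's on".toList,
   "what is on".toList, "see this".toList]

-- the positional scan: for each suffix (= position i), test each phrase as a prefix
def altScan : List Char → Bool
  | [] => false
  | c :: t => altPhrases.any (fun p => PySem.Chars.startswith (c :: t) p) || altScan t

def message_mentions_screen_py_alt (message : String) : Bool :=
  altScan (PySem.Str.lower message).toList

-- ===== PRECONDITION & SPEC =====
def Spec_message_mentions_screen_py (message : String) (out : Bool) : Prop := out = message_mentions_screen_py_alt message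
instance (message : String) (out : Bool) : Decidable (Spec_message_mentions_screen_py message out) := by unfold Spec_message_mentions_screen_py; infer_instance

-- ===== CLAIM (what is proved, stated in full; the proofs are below) =====
def Claim_equal_message_mentions_screen_py : Prop := ∀ (message : String), Dom_message_mentions_screen_py message → Spec_message_mentions_screen_py message (message_mentions_screen_py message)

-- ===== LEMMAS AND PROOFS =====

-- peel one character off an isIn (substring) test
theorem isIn_cons_eq (sub : List Char) (c : Char) (t : List Char) :
    PySem.Chars.isIn sub (c :: t)
      = (PySem.Chars.startswith (c :: t) sub || PySem.Chars.isIn sub t) := by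
  rw [Bool.eq_iff_iff]
  simp [PySem.Chars.isIn_iff_infix, PySem.Chars.startswith_iff, List.infix_cons_iff]

-- the positional scan computes "some phrase is an infix"
theorem altScan_eq (cs : List Char) :
    altScan cs = altPhrases.any (fun p => PySem.Chars.isIn p cs) := by
  induction cs with
  | nil => decide
  | cons c t ih =>
      rw [altScan, ih]
      rw [Bool.eq_iff_iff]
      simp [altPhrases, isIn_cons_eq]
      tauto

-- "screenshot" as a substring implies "screen" as a substring
theorem screenshot_imp_screen (s : List Char) :
    PySem.Chars.isIn "screenshot".toList s = true →
    PySem.Chars.isIn "screen".toList s = true := by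
  simp only [PySem.Chars.isIn_iff_infix]
  intro h
  exact List.IsInfix.trans (by decide : "screen".toList <:+: "screenshot".toList) h

-- a || in the middle of a disjunction may be dropped when it implies the head
theorem or_absorb (a b c : Bool) (h : b = true → a = true) :
    (a || (b || c)) = (a || c) := by
  cases a <;> cases b <;> simp_all

-- ===== VERDICT (by name: the statement is the Claim_ definition above) =====
theorem message_mentions_screen_py_spec : Claim_equal_message_mentions_screen_py := by
  intro message _
  unfold Spec_message_mentions_screen_py message_mentions_screen_py message_mentions_screen_py_alt
  rw [altScan_eq]
  have hss := screenshot_imp_screen (PySem.Str.lower message).toList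
  simp only [altPhrases, List.any_cons, List.any_nil, PySem.Str.isIn_eq, Bool.or_false]
  exact or_absorb _ _ _ hss
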